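-- pv_equiv track=rewrite | github.com/jfierrogg/Curso-Python-Django-2 | M3/L2/D3/31_python.py | analizar_numeros
-- ===== SOURCE A (Python) =====
-- def analizar_numeros(lista_numeros):
--     # separa positivos, negativos y ceros
--     positivos = 0
--     negativos = 0
--     ceros = 0
--
--     for n in lista_numeros:
--         if n > 0:
--             positivos += 1
--         elif n < 0:
--             negativos += 1
--         else:
--             ceros += 1
--
--     return {
--         "positivos": positivos,
--         "negativos": negativos,
--         "ceros": ceros,
--         "cantidad": len(lista_numeros),
--         "suma": sum(lista_numeros),
--     }
-- ===== SOURCE B (Python) =====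
-- def analizar_numeros(lista_numeros):
--     return {
--         "positivos": sum(1 for n in lista_numeros if n > 0),
--         "negativos": sum(1 for n in lista_numeros if n < 0),
--         "ceros": sum(1 for n in lista_numeros if n == 0),
--         "cantidad": len(lista_numeros),
--         "suma": sum(lista_numeros),
--     }
-- ===== Notes on version B (the rewrite author's own statement) =====
-- stated objective: simpler
-- what changed: Replaces the single branching counting loop with three independent filtered scans (one per category) and builds the dict directly from them.
import Mathlib
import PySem

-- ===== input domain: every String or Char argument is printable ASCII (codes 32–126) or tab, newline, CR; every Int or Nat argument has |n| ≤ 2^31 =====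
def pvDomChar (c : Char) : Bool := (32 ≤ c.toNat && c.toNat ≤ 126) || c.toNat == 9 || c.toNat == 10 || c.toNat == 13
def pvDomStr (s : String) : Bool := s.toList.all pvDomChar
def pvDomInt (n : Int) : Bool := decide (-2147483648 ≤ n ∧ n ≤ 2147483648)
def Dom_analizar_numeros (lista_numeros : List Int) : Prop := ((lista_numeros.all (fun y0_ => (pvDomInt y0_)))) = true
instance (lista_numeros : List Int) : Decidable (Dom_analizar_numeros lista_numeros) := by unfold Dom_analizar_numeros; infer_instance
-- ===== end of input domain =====

-- ===== PORT A =====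
-- B uses three independent filtered scans instead of A's single branching loop (objective: simpler).
def analizar_numeros (lista_numeros : List Int) : List (String × Int) :=
  let st := lista_numeros.foldl
    (fun (acc : Int × Int × Int) n =>
      if n > 0 then (acc.1 + 1, acc.2.1, acc.2.2)
      else if n < 0 then (acc.1, acc.2.1 + 1, acc.2.2)
      else (acc.1, acc.2.1, acc.2.2 + 1)) (0, 0, 0)
  [("positivos", st.1), ("negativos", st.2.1), ("ceros", st.2.2),
   ("cantidad", (lista_numeros.length : Int)),
   ("suma", lista_numeros.foldl (· + ·) 0)]

-- ===== PORT B =====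
def analizar_numeros_alt (lista_numeros : List Int) : List (String × Int) :=
  [("positivos", ((lista_numeros.filter (fun n => n > 0)).map (fun _ => (1 : Int))).sum),
   ("negativos", ((lista_numeros.filter (fun n => n < 0)).map (fun _ => (1 : Int))).sum),
   ("ceros", ((lista_numeros.filter (fun n => n == 0)).map (fun _ => (1 : Int))).sum),
   ("cantidad", (lista_numeros.length : Int)),
   ("suma", lista_numeros.sum)]

-- ===== PRECONDITION & SPEC =====
def Spec_analizar_numeros (lista_numeros : List Int) (out : List (String × Int)) : Prop := out = analizar_numeros_alt lista_numeros
instance (lista_numeros : List Int) (out : List (String × Int)) : Decidable (Spec_analizar_numeros lista_numeros out) := by unfold Spec_analizar_numeros; infer_instance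

-- ===== CLAIM (what is proved, stated in full; the proofs are below) =====
def Claim_equal_analizar_numeros : Prop := ∀ (lista_numeros : List Int), Dom_analizar_numeros lista_numeros → Spec_analizar_numeros lista_numeros (analizar_numeros lista_numeros)

-- ===== LEMMAS AND PROOFS =====

-- ===== VERDICT (by name: the statement is the Claim_ definition above) =====
lemma counts_eq (xs : List Int) :
    xs.foldl
      (fun (acc : Int × Int × Int) n =>
        if n > 0 then (acc.1 + 1, acc.2.1, acc.2.2)
        else if n < 0 then (acc.1, acc.2.1 + 1, acc.2.2)
        else (acc.1, acc.2.1, acc.2.2 + 1)) (0, 0, 0)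
    = (((xs.filter (fun n => n > 0)).map (fun _ => (1 : Int))).sum,
       ((xs.filter (fun n => n < 0)).map (fun _ => (1 : Int))).sum,
       ((xs.filter (fun n => n == 0)).map (fun _ => (1 : Int))).sum) := by
  suffices h : ∀ (p q r : Int),
      xs.foldl
        (fun (acc : Int × Int × Int) n =>
          if n > 0 then (acc.1 + 1, acc.2.1, acc.2.2)
          else if n < 0 then (acc.1, acc.2.1 + 1, acc.2.2)
          else (acc.1, acc.2.1, acc.2.2 + 1)) (p, q, r)
      = (p + ((xs.filter (fun n => n > 0)).map (fun _ => (1 : Int))).sum,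
         q + ((xs.filter (fun n => n < 0)).map (fun _ => (1 : Int))).sum,
         r + ((xs.filter (fun n => n == 0)).map (fun _ => (1 : Int))).sum) by
    simpa using h 0 0 0
  induction xs with
  | nil => simp
  | cons x xs ih =>
    intro p q r
    by_cases h1 : x > 0
    · have h2 : ¬ (x < 0) := by omega
      have h3 : ¬ (x == 0) = true := by simp; omega
      simp [List.foldl_cons, h1, h2, h3, ih, add_assoc]
    · by_cases h2 : x < 0
      · have h3 : ¬ (x == 0) = true := by simp; omega
        simp [List.foldl_cons, h1, h2, h3, ih, add_assoc]
      · have h3 : (x == 0) = true := by simp; omega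
        simp [List.foldl_cons, h1, h2, h3, ih, add_assoc]

lemma foldl_add_eq_sum (xs : List Int) : xs.foldl (· + ·) 0 = xs.sum := by
  suffices h : ∀ (a : Int), xs.foldl (· + ·) a = a + xs.sum by simpa using h 0
  induction xs with
  | nil => simp
  | cons x xs ih => intro a; simp [List.foldl_cons, ih, add_assoc]

theorem analizar_numeros_spec : Claim_equal_analizar_numeros := by
  intro xs _
  unfold Spec_analizar_numeros analizar_numeros analizar_numeros_alt
  simp only [counts_eq, foldl_add_eq_sum]
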